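-- pv_equiv track=rewrite | github.com/Mateoswiatek/constraint_programming | proj_b_torpedo/optTorpedo/hotstart/optimizer_stage2.py | optimize_torpedo_assignment
-- ===== SOURCE A (Python) =====
-- from typing import List, Dict, Tuple
--
-- def optimize_torpedo_assignment(start_trip: List[int], end_trip: List[int]) -> Tuple[List[int], int]:
--     """
--     Find minimum torpedo assignment using greedy interval coloring.
--
--     This is the classic interval graph coloring problem:
--     - Each pouring is an interval [start_trip, end_trip]
--     - Overlapping intervals need different colors (torpedoes)
--     - Greedy approach: sort by start time, assign to first available torpedo
--
--     This is OPTIMAL for interval graphs!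
--
--     Returns:
--         (torpedo_assignment, num_torpedoes)
--     """
--     n = len(start_trip)
--
--     # Sort pourings by start time
--     sorted_pourings = sorted(range(n), key=lambda i: start_trip[i])
--
--     # Greedy assignment
--     torpedo_assignment = [0] * n
--     torpedo_end_times = []  # End time of each torpedo's last assignment
--
--     for i in sorted_pourings:
--         s, e = start_trip[i], end_trip[i]
--
--         # Find first available torpedo (one that finished before this starts)
--         assigned = False
--         for t in range(len(torpedo_end_times)):
--             if torpedo_end_times[t] <= s:
--                 # Torpedo t is free - assign and update its end time
--                 torpedo_assignment[i] = t + 1  # 1-indexed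
--                 torpedo_end_times[t] = e
--                 assigned = True
--                 break
--
--         if not assigned:
--             # Need new torpedo
--             torpedo_assignment[i] = len(torpedo_end_times) + 1
--             torpedo_end_times.append(e)
--
--     return torpedo_assignment, len(torpedo_end_times)
-- ===== SOURCE B (Python) =====
-- def _insert_desc(xs, x):
--     """insert x into descending-sorted xs, keeping it sorted (binary search)"""
--     lo, hi = 0, len(xs)
--     while lo < hi:
--         mid = (lo + hi) // 2
--         if xs[mid] > x:
--             lo = mid + 1
--         else:
--             hi = mid
--     xs.insert(lo, x)
--
-- def optimize_torpedo_assignment(start_trip, end_trip):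
--     n = len(start_trip)
--     assignment = [0] * n
--     busy = []  # (end time, label) of running pourings, sorted by end DESCENDING
--     free = []  # labels of idle torpedoes, sorted DESCENDING
--     num = 0
--     for i in sorted(range(n), key=lambda k: start_trip[k]):
--         s = start_trip[i]
--         while busy and busy[-1][0] <= s:
--             _insert_desc(free, busy.pop()[1])
--         if free:
--             c = free.pop()
--         else:
--             num += 1
--             c = num
--         _insert_desc(busy, (end_trip[i], c))
--         assignment[i] = c
--     return assignment, num
-- ===== Notes on version B (the rewrite author's own statement) =====
-- stated objective: faster
-- what changed: B drops A's per-torpedo end-time table and linear first-fit scan: it sweeps pourings in start order keeping two descending-sorted lists (running pourings by end time, idle torpedo labels) maintained by hand-written binary-search insertion, and pops the minimum idle label, which equals A's first-fit torpedo.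
import Mathlib
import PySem

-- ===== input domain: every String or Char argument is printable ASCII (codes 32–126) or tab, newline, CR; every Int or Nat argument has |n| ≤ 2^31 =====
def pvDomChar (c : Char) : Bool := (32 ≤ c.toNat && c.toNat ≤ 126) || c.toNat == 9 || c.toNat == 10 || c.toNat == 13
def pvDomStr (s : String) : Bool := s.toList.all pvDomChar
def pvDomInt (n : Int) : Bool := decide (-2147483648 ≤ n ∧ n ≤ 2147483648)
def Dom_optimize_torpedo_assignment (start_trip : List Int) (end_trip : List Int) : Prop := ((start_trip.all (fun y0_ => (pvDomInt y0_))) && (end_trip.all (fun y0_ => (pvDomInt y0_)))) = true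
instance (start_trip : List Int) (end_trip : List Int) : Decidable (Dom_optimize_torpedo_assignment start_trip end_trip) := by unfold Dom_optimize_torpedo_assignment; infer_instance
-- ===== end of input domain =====

-- B replaces A's per-torpedo end-time table and O(k) first-fit scan by an event-sweep with two
-- descending-sorted lists (running pourings by end time, idle torpedo labels), maintained by
-- hand-written binary-search insertion; the popped minimum idle label IS the first-fit torpedo.
-- Objective: faster (A is O(n*k) in the torpedo count k, B is O(n log n) comparisons).

-- ===== PORT A =====
-- inner loop "for t in range(len(torpedo_end_times)): if torpedo_end_times[t] <= s: break":
-- scans the end-time list left to right, t is the running index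
def pvScanA (ends : List Int) (s : Int) (t : Nat) : Option Nat :=
  match ends with
  | [] => none
  | e :: rest => if e ≤ s then some t else pvScanA rest s (t + 1)

-- one iteration of A's outer loop; state = (torpedo_assignment, torpedo_end_times).
-- start_trip[i] / end_trip[i] are in range under Pre_, so getD is exact.
def pvStepA (start_trip end_trip : List Int) (st : List Int × List Int) (i : Nat) :
    List Int × List Int :=
  let s := start_trip.getD i 0
  let e := end_trip.getD i 0
  match pvScanA st.2 s 0 with
  | some t => (st.1.set i ((t : Int) + 1), st.2.set t e)
  | none => (st.1.set i ((st.2.length : Int) + 1), st.2 ++ [e])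

def optimize_torpedo_assignment (start_trip : List Int) (end_trip : List Int) : List Int × Int :=
  let n := start_trip.length
  let sorted_pourings := PySem.List.sorted (List.range n) (fun i => start_trip.getD i 0) false
  let fin := sorted_pourings.foldl (pvStepA start_trip end_trip) (List.replicate n 0, [])
  (fin.1, (fin.2.length : Int))

-- ===== PORT B =====
-- Python's `>` on the elements _insert_desc compares: ints, and (end, label) tuples (lexicographic)
def pvGtI (a b : Int) : Bool := decide (a > b)
def pvGtP (p q : Int × Int) : Bool := decide (p.1 > q.1 ∨ (p.1 = q.1 ∧ p.2 > q.2))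

-- the `while lo < hi` binary-search loop of _insert_desc (gt is the `>` of the element type;
-- xs[mid] is always in range, so getD with default d is exact)
def pvFindDesc {α : Type} (gt : α → α → Bool) (d : α) (xs : List α) (x : α) (lo hi : Nat) : Nat :=
  if lo < hi then
    let mid := (lo + hi) / 2
    if gt (xs.getD mid d) x then pvFindDesc gt d xs x (mid + 1) hi
    else pvFindDesc gt d xs x lo mid
  else lo
termination_by hi - lo
decreasing_by all_goals omega

-- _insert_desc(xs, x): find the position, then xs.insert(lo, x)
def pvInsertDesc {α : Type} (gt : α → α → Bool) (d : α) (xs : List α) (x : α) : List α :=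
  PySem.List.insert xs ((pvFindDesc gt d xs x 0 xs.length : Nat) : Int) x

-- "while busy and busy[-1][0] <= s: _insert_desc(free, busy.pop()[1])"
def pvMove (s : Int) (busy : List (Int × Int)) (free : List Int) : List (Int × Int) × List Int :=
  match hb : busy.getLast? with
  | none => (busy, free)
  | some p =>
    if p.1 ≤ s then pvMove s busy.dropLast (pvInsertDesc pvGtI 0 free p.2)
    else (busy, free)
termination_by busy.length
decreasing_by
  have hne : busy ≠ [] := by intro h; subst h; simp at hb
  have := List.length_pos_of_ne_nil hne
  simp [List.length_dropLast]; omega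

-- one iteration of B's loop; state = (assignment, busy, free, num);
-- "if free: c = free.pop()" = match on free's last element
def pvStepB (start_trip end_trip : List Int)
    (st : List Int × List (Int × Int) × List Int × Int) (i : Nat) :
    List Int × List (Int × Int) × List Int × Int :=
  let s := start_trip.getD i 0
  let mv := pvMove s st.2.1 st.2.2.1
  match mv.2.getLast? with
  | some c =>
      (st.1.set i c, pvInsertDesc pvGtP (0, 0) mv.1 (end_trip.getD i 0, c), mv.2.dropLast, st.2.2.2)
  | none =>
      (st.1.set i (st.2.2.2 + 1), pvInsertDesc pvGtP (0, 0) mv.1 (end_trip.getD i 0, st.2.2.2 + 1),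
        mv.2, st.2.2.2 + 1)

def optimize_torpedo_assignment_alt (start_trip : List Int) (end_trip : List Int) : List Int × Int :=
  let n := start_trip.length
  let fin := (PySem.List.sorted (List.range n) (fun k => start_trip.getD k 0) false).foldl
      (pvStepB start_trip end_trip) (List.replicate n 0, [], [], 0)
  (fin.1, fin.2.2.2)

-- ===== PRECONDITION & SPEC =====
-- A evaluates end_trip[i] for every i < len(start_trip): it raises IndexError iff
-- len(end_trip) < len(start_trip); exactly those inputs are excluded.
def Pre_optimize_torpedo_assignment (start_trip : List Int) (end_trip : List Int) : Prop :=
  start_trip.length ≤ end_trip.length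
instance (start_trip : List Int) (end_trip : List Int) : Decidable (Pre_optimize_torpedo_assignment start_trip end_trip) := by unfold Pre_optimize_torpedo_assignment; infer_instance

def pvWitness_optimize_torpedo_assignment : List Int × List Int := ([1, 3, 2], [4, 5, 6])

def Spec_optimize_torpedo_assignment (start_trip : List Int) (end_trip : List Int) (out : List Int × Int) : Prop := out = optimize_torpedo_assignment_alt start_trip end_trip
instance (start_trip : List Int) (end_trip : List Int) (out : List Int × Int) : Decidable (Spec_optimize_torpedo_assignment start_trip end_trip out) := by unfold Spec_optimize_torpedo_assignment; infer_instance

-- ===== CLAIM (what is proved, stated in full; the proofs are below) =====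
def Claim_equal_optimize_torpedo_assignment : Prop := ∀ (start_trip : List Int) (end_trip : List Int), Dom_optimize_torpedo_assignment start_trip end_trip → Pre_optimize_torpedo_assignment start_trip end_trip → Spec_optimize_torpedo_assignment start_trip end_trip (optimize_torpedo_assignment start_trip end_trip)

-- ===== LEMMAS AND PROOFS =====

lemma pvScanA_none (ends : List Int) (s : Int) : ∀ t0, pvScanA ends s t0 = none ↔
    ∀ u, u < ends.length → s < ends.getD u 0 := by
  induction ends with
  | nil => intro t0; simp [pvScanA]
  | cons e rest ih =>
    intro t0
    simp only [pvScanA]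
    by_cases h : e ≤ s
    · simp [h]; exact ⟨0, by simp, by simpa using h⟩
    · simp only [if_neg h, ih]
      constructor
      · intro hall u hu
        match u with
        | 0 => simpa using lt_of_not_ge h
        | v + 1 => exact hall v (by simpa using hu)
      · intro hall u hu
        have := hall (u + 1) (by simpa using hu)
        simpa using this


lemma pvScanA_some (ends : List Int) (s : Int) : ∀ t0 t, pvScanA ends s t0 = some t →
    ∃ u, t = t0 + u ∧ u < ends.length ∧ ends.getD u 0 ≤ s ∧
      ∀ v, v < u → s < ends.getD v 0 := by
  induction ends with
  | nil => intro t0 t h; simp [pvScanA] at h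
  | cons e rest ih =>
    intro t0 t h
    simp only [pvScanA] at h
    by_cases he : e ≤ s
    · rw [if_pos he] at h
      obtain rfl : t0 = t := by simpa using h
      exact ⟨0, by omega, by simp, by simpa using he, by omega⟩
    · rw [if_neg he] at h
      obtain ⟨u, hu1, hu2, hu3, hu4⟩ := ih (t0 + 1) t h
      refine ⟨u + 1, by omega, by simpa using hu2, by simpa using hu3, ?_⟩
      intro v hv
      match v with
      | 0 => simpa using lt_of_not_ge he
      | w + 1 => exact by simpa using hu4 w (by omega)


lemma pvFindDesc_spec {α : Type} (gt : α → α → Bool) (d : α) (xs : List α) (x : α)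
    (H1 : ∀ a b c, gt b a = false → gt b c = true → gt a c = true)
    (H2 : ∀ a b c, gt b a = false → gt a c = false → gt b c = false)
    (hs : xs.Pairwise (fun a b => gt b a = false)) :
    ∀ lo hi, lo ≤ hi → hi ≤ xs.length →
    (∀ j, j < lo → gt (xs.getD j d) x = true) →
    (∀ j, hi ≤ j → j < xs.length → gt (xs.getD j d) x = false) →
    lo ≤ pvFindDesc gt d xs x lo hi ∧ pvFindDesc gt d xs x lo hi ≤ hi ∧
    (∀ j, j < pvFindDesc gt d xs x lo hi → gt (xs.getD j d) x = true) ∧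
    (∀ j, pvFindDesc gt d xs x lo hi ≤ j → j < xs.length → gt (xs.getD j d) x = false) := by
  intro lo hi
  fun_induction pvFindDesc gt d xs x lo hi with
  | case1 lo hi hlt mid hgt ih =>
    intro hle hhi hbefore hafter
    have hmid : mid < xs.length := by omega
    have hpw := List.pairwise_iff_getElem.mp hs
    obtain ⟨r1, r2, r3, r4⟩ := ih (by omega) hhi
      (by
        intro j hj
        by_cases hjm : j < mid
        · have hrel := hpw j mid (by omega) hmid hjm
          have hgt' : gt xs[mid] x = true := by rwa [List.getD_eq_getElem xs d hmid] at hgt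
          rw [List.getD_eq_getElem xs d (by omega : j < xs.length)]
          exact H1 _ _ _ hrel hgt'
        · have : j = mid := by omega
          subst this; exact hgt)
      hafter
    exact ⟨by omega, r2, r3, r4⟩
  | case2 lo hi hlt mid hgt ih =>
    intro hle hhi hbefore hafter
    have hmid : mid < xs.length := by omega
    have hpw := List.pairwise_iff_getElem.mp hs
    obtain ⟨r1, r2, r3, r4⟩ := ih (by omega) (by omega) hbefore
      (by
        intro j hj hjl
        by_cases hjm : mid < j
        · have hrel := hpw mid j hmid hjl hjm
          have hgt' : gt xs[mid] x = false := by
            rw [List.getD_eq_getElem xs d hmid] at hgt; simpa using hgt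
          rw [List.getD_eq_getElem xs d hjl]
          exact H2 _ _ _ hrel hgt'
        · have : j = mid := by omega
          subst this; simpa using hgt)
    exact ⟨r1, by omega, r3, r4⟩
  | case3 lo hi hnlt =>
    intro hle hhi hbefore hafter
    exact ⟨le_refl _, by omega, hbefore, by intro j hj hjl; exact hafter j (by omega) hjl⟩


lemma pvFindDesc_le {α : Type} (gt : α → α → Bool) (d : α) (xs : List α) (x : α) :
    ∀ lo hi, lo ≤ hi → lo ≤ pvFindDesc gt d xs x lo hi ∧ pvFindDesc gt d xs x lo hi ≤ hi := by
  intro lo hi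
  fun_induction pvFindDesc gt d xs x lo hi with
  | case1 lo hi hlt mid hgt ih => intro h; have := ih (by omega); omega
  | case2 lo hi hlt mid hgt ih => intro h; have := ih (by omega); omega
  | case3 lo hi hnlt => intro h; omega


lemma pvInsertDesc_eq {α : Type} (gt : α → α → Bool) (d : α) (xs : List α) (x : α) :
    pvInsertDesc gt d xs x
      = xs.take (pvFindDesc gt d xs x 0 xs.length) ++ x :: xs.drop (pvFindDesc gt d xs x 0 xs.length) := by
  unfold pvInsertDesc
  exact PySem.List.insert_natCast xs _ x (pvFindDesc_le gt d xs x 0 xs.length (by omega)).2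


lemma pvInsertDesc_perm {α : Type} (gt : α → α → Bool) (d : α) (xs : List α) (x : α) :
    (pvInsertDesc gt d xs x).Perm (x :: xs) := by
  rw [pvInsertDesc_eq]
  exact List.perm_middle.trans (by rw [List.take_append_drop])


lemma pvInsertDesc_mem {α : Type} (gt : α → α → Bool) (d : α) (xs : List α) (x y : α) :
    y ∈ pvInsertDesc gt d xs x ↔ y ∈ xs ∨ y = x := by
  rw [(pvInsertDesc_perm gt d xs x).mem_iff]
  simp [or_comm]


lemma pvInsertDesc_nodup {α : Type} (gt : α → α → Bool) (d : α) (xs : List α) (x : α)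
    (h : xs.Nodup) (hx : x ∉ xs) : (pvInsertDesc gt d xs x).Nodup := by
  rw [(pvInsertDesc_perm gt d xs x).nodup_iff]
  exact List.nodup_cons.mpr ⟨hx, h⟩


lemma pvInsertDesc_sorted {α : Type} (gt : α → α → Bool) (d : α) (xs : List α) (x : α)
    (H1 : ∀ a b c, gt b a = false → gt b c = true → gt a c = true)
    (H2 : ∀ a b c, gt b a = false → gt a c = false → gt b c = false)
    (H3 : ∀ a b, gt a b = true → gt b a = false)
    (hs : xs.Pairwise (fun a b => gt b a = false)) :
    (pvInsertDesc gt d xs x).Pairwise (fun a b => gt b a = false) := by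
  obtain ⟨-, -, r3, r4⟩ := pvFindDesc_spec gt d xs x H1 H2 hs 0 xs.length (by omega) (le_refl _)
    (by omega) (by intro j hj hjl; omega)
  set r := pvFindDesc gt d xs x 0 xs.length with hr
  have hrlen : r ≤ xs.length := (pvFindDesc_le gt d xs x 0 xs.length (by omega)).2
  rw [pvInsertDesc_eq]
  have htake : ∀ y ∈ xs.take r, gt y x = true := by
    intro y hy
    obtain ⟨k, hk, rfl⟩ := List.mem_iff_getElem.mp hy
    rw [List.getElem_take]
    have := r3 k (by simp at hk; omega)
    rwa [List.getD_eq_getElem xs d (by simp at hk; omega)] at this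
  have hdrop : ∀ y ∈ xs.drop r, gt y x = false := by
    intro y hy
    obtain ⟨k, hk, rfl⟩ := List.mem_iff_getElem.mp hy
    rw [List.getElem_drop]
    have := r4 (r + k) (by omega) (by simp at hk; omega)
    rwa [List.getD_eq_getElem xs d (by simp at hk; omega)] at this
  apply List.pairwise_append.mpr
  refine ⟨hs.sublist (List.take_sublist r xs), ?_, ?_⟩
  · apply List.pairwise_cons.mpr
    exact ⟨hdrop, hs.sublist (List.drop_sublist r xs)⟩
  · intro a ha b hb
    rcases List.mem_cons.mp hb with rfl | hb
    · exact H3 a b (htake a ha)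
    · -- a from take, b from drop: use pairwise of xs via indices
      obtain ⟨k1, hk1, rfl⟩ := List.mem_iff_getElem.mp ha
      obtain ⟨k2, hk2, rfl⟩ := List.mem_iff_getElem.mp hb
      rw [List.getElem_take, List.getElem_drop]
      have hpw := List.pairwise_iff_getElem.mp hs
      exact hpw k1 (r + k2) (by simp at hk1; omega) (by simp at hk2; omega) (by simp at hk1; omega)


lemma pvGtI_H1 : ∀ a b c : Int, pvGtI b a = false → pvGtI b c = true → pvGtI a c = true := by
  intro a b c h1 h2; simp [pvGtI] at *; omega
lemma pvGtI_H2 : ∀ a b c : Int, pvGtI b a = false → pvGtI a c = false → pvGtI b c = false := by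
  intro a b c h1 h2; simp [pvGtI] at *; omega
lemma pvGtI_H3 : ∀ a b : Int, pvGtI a b = true → pvGtI b a = false := by
  intro a b h; simp [pvGtI] at *; omega
lemma pvGtP_H1 : ∀ a b c : Int × Int, pvGtP b a = false → pvGtP b c = true → pvGtP a c = true := by
  intro a b c h1 h2; simp [pvGtP] at *; omega
lemma pvGtP_H2 : ∀ a b c : Int × Int, pvGtP b a = false → pvGtP a c = false → pvGtP b c = false := by
  intro a b c h1 h2; simp [pvGtP] at *; omega
lemma pvGtP_H3 : ∀ a b : Int × Int, pvGtP a b = true → pvGtP b a = false := by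
  intro a b h; simp [pvGtP] at *; omega


lemma pvMove_nil (s : Int) (free : List Int) : pvMove s [] free = ([], free) := by
  rw [pvMove.eq_def]
  rfl


lemma pvMove_concat (s : Int) (bs : List (Int × Int)) (b : Int × Int) (free : List Int) :
    pvMove s (bs ++ [b]) free =
      if b.1 ≤ s then pvMove s bs (pvInsertDesc pvGtI 0 free b.2) else (bs ++ [b], free) := by
  rw [pvMove.eq_def]
  split
  next heq => simp at heq
  next p heq =>
    rw [List.getLast?_concat] at heq
    cases heq
    rw [List.dropLast_concat]


lemma pvMove_spec (s : Int) : ∀ (busy : List (Int × Int)) (free : List Int),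
    busy.Pairwise (fun a b => pvGtP b a = false) →
    free.Pairwise (fun a b => pvGtI b a = false) →
    free.Nodup → (busy.map (·.2)).Nodup → (∀ p ∈ busy, p.2 ∉ free) →
    (pvMove s busy free).1 = busy.filter (fun p => decide (s < p.1)) ∧
    (∀ x, x ∈ (pvMove s busy free).2 ↔ x ∈ free ∨ ∃ p ∈ busy, p.1 ≤ s ∧ x = p.2) ∧
    (pvMove s busy free).2.Pairwise (fun a b => pvGtI b a = false) ∧
    (pvMove s busy free).2.Nodup := by
  intro busy
  induction busy using List.reverseRecOn with
  | nil =>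
    intro free _ hfs hfn _ _
    rw [pvMove_nil]
    simp [hfs, hfn]
  | append_singleton bs b ih =>
    intro free hbs hfs hfn hbn hdisj
    rw [pvMove_concat]
    by_cases hbl : b.1 ≤ s
    · rw [if_pos hbl]
      have hbs' : bs.Pairwise (fun a b => pvGtP b a = false) :=
        hbs.sublist (by simp)
      have hfs' := pvInsertDesc_sorted pvGtI 0 free b.2 pvGtI_H1 pvGtI_H2 pvGtI_H3 hfs
      have hb2free : b.2 ∉ free := hdisj b (by simp)
      have hfn' := pvInsertDesc_nodup pvGtI 0 free b.2 hfn hb2free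
      have hbn' : (bs.map (·.2)).Nodup := by
        have hsub : List.Sublist (bs.map (·.2)) ((bs ++ [b]).map (·.2)) := by simp
        exact hbn.sublist hsub
      have hdisj' : ∀ p ∈ bs, p.2 ∉ pvInsertDesc pvGtI 0 free b.2 := by
        intro p hp hmem
        rcases (pvInsertDesc_mem pvGtI 0 free b.2 p.2).mp hmem with h | h
        · exact hdisj p (by simp [hp]) h
        · have hne : p.2 ≠ b.2 := by
            intro heq
            rw [List.map_append] at hbn
            have hd := List.disjoint_of_nodup_append hbn
            exact hd (List.mem_map.mpr ⟨p, hp, heq⟩) (by simp)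
          exact hne h
      obtain ⟨r1, r2, r3, r4⟩ := ih (pvInsertDesc pvGtI 0 free b.2) hbs' hfs' hfn' hbn' hdisj'
      refine ⟨?_, ?_, r3, r4⟩
      · rw [r1, List.filter_append]
        simp [show ¬ (s < b.1) by omega]
      · intro x
        rw [r2 x, pvInsertDesc_mem]
        constructor
        · rintro ((h | h) | ⟨p, hp, h1, h2⟩)
          · exact Or.inl h
          · exact Or.inr ⟨b, by simp, hbl, h⟩
          · exact Or.inr ⟨p, by simp [hp], h1, h2⟩
        · rintro (h | ⟨p, hp, h1, h2⟩)
          · exact Or.inl (Or.inl h)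
          · rcases List.mem_append.mp hp with hm | hm
            · exact Or.inr ⟨p, hm, h1, h2⟩
            · simp only [List.mem_singleton] at hm
              subst hm
              exact Or.inl (Or.inr h2)
    · rw [if_neg hbl]
      refine ⟨?_, ?_, hfs, hfn⟩
      · rw [eq_comm, List.filter_eq_self]
        intro p hp
        rcases List.mem_append.mp hp with hm | hm
        · -- p before b: p ≥lex b so p.1 ≥ b.1 > s
          have hrel : pvGtP b p = false := by
            have := List.pairwise_append.mp hbs
            exact this.2.2 p hm b (by simp)
          simp only [pvGtP, decide_eq_false_iff_not] at hrel
          simp; omega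
        · simp only [List.mem_singleton] at hm
          subst hm
          simp; omega
      · intro x
        constructor
        · intro h; exact Or.inl h
        · rintro (h | ⟨p, hp, h1, h2⟩)
          · exact h
          · exfalso
            rcases List.mem_append.mp hp with hm | hm
            · have hrel : pvGtP b p = false := by
                have := List.pairwise_append.mp hbs
                exact this.2.2 p hm b (by simp)
              simp only [pvGtP, decide_eq_false_iff_not] at hrel
              omega
            · simp only [List.mem_singleton] at hm
              subst hm
              omega


lemma pvLast_min (xs : List Int) (h : xs ≠ []) (hs : xs.Pairwise (fun a b => pvGtI b a = false)) :
    ∀ x ∈ xs, xs.getLast h ≤ x := by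
  induction xs using List.reverseRecOn with
  | nil => simp at h
  | append_singleton ys l _ =>
    intro x hx
    rw [List.getLast_concat]
    rcases List.mem_append.mp hx with hm | hm
    · have := (List.pairwise_append.mp hs).2.2 x hm l (by simp)
      simp [pvGtI] at this
      omega
    · simp at hm; omega


lemma pvMem_dropLast (xs : List Int) (h : xs ≠ []) (hnd : xs.Nodup) (x : Int) :
    x ∈ xs.dropLast ↔ x ∈ xs ∧ x ≠ xs.getLast h := by
  induction xs using List.reverseRecOn with
  | nil => simp at h
  | append_singleton ys l _ =>
    rw [List.dropLast_concat, List.getLast_concat]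
    have hd := List.disjoint_of_nodup_append hnd
    constructor
    · intro hm
      exact ⟨List.mem_append_left _ hm, by intro heq; exact hd (heq ▸ hm) (by simp)⟩
    · rintro ⟨hm, hne⟩
      rcases List.mem_append.mp hm with hm | hm
      · exact hm
      · simp at hm; exact absurd hm hne


lemma pvGetD_set (l : List Int) (t u : Nat) (v : Int) :
    (l.set t v).getD u 0 = if t = u ∧ t < l.length then v else l.getD u 0 := by
  simp only [List.getD_eq_getElem?_getD, List.getElem?_set]
  by_cases h1 : t = u
  · subst h1
    by_cases h2 : t < l.length
    · simp [h2]
    · simp [h2]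
  · simp [h1]


lemma pvGetD_append_lt (l : List Int) (u : Nat) (e : Int) (h : u < l.length) :
    (l ++ [e]).getD u 0 = l.getD u 0 := by
  simp [List.getD_eq_getElem?_getD, List.getElem?_append_left h]


lemma pvGetD_append_len (l : List Int) (e : Int) : (l ++ [e]).getD l.length 0 = e := by
  simp [List.getD_eq_getElem?_getD]


-- the invariant tying A's torpedo_end_times to B's (busy, free) structures; M bounds the
-- starts processed so far
structure pvInvB (startl endl : List Int) (M : Int) (busy : List (Int × Int)) (free : List Int)
    (ends : List Int) (num : Int) : Prop where
  num_eq : num = (ends.length : Int)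
  busy_sorted : busy.Pairwise (fun a b => pvGtP b a = false)
  free_sorted : free.Pairwise (fun a b => pvGtI b a = false)
  free_nodup : free.Nodup
  busy_nodup : (busy.map (·.2)).Nodup
  disj : ∀ p ∈ busy, p.2 ∉ free
  busy_src : ∀ p ∈ busy, ∃ t : Nat, t < ends.length ∧ p = (ends.getD t 0, (t : Int) + 1)
  free_src : ∀ x ∈ free, ∃ t : Nat, t < ends.length ∧ x = (t : Int) + 1 ∧ ends.getD t 0 ≤ M
  part : ∀ t : Nat, t < ends.length →
    (ends.getD t 0, (t : Int) + 1) ∈ busy ∨ ((t : Int) + 1) ∈ free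


lemma pvMainB (startl endl : List Int) : ∀ (order : List Nat) (M : Int)
    (assign ends : List Int) (busy : List (Int × Int)) (free : List Int) (num : Int),
    pvInvB startl endl M busy free ends num →
    (∀ i ∈ order, M ≤ startl.getD i 0) →
    order.Pairwise (fun a b => startl.getD a 0 ≤ startl.getD b 0) →
    (order.foldl (pvStepA startl endl) (assign, ends)).1
      = (order.foldl (pvStepB startl endl) (assign, busy, free, num)).1 ∧
    (((order.foldl (pvStepA startl endl) (assign, ends)).2.length : Int))
      = (order.foldl (pvStepB startl endl) (assign, busy, free, num)).2.2.2 := by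
  intro order
  induction order with
  | nil =>
    intro M assign ends busy free num inv _ _
    exact ⟨rfl, inv.num_eq.symm⟩
  | cons i rest ih =>
    intro M assign ends busy free num inv H hpw
    obtain ⟨hpw_head, hpw_rest⟩ := List.pairwise_cons.mp hpw
    simp only [List.foldl_cons]
    set s := startl.getD i 0 with hs
    set e := endl.getD i 0 with he
    have hMs : M ≤ s := H i List.mem_cons_self
    obtain ⟨m1, m2, m3, m4⟩ := pvMove_spec s busy free inv.busy_sorted inv.free_sorted
      inv.free_nodup inv.busy_nodup inv.disj
    set mv := pvMove s busy free with hmv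
    -- derived facts after the move
    have hfree' : ∀ x ∈ mv.2, ∃ t : Nat, t < ends.length ∧ x = (t : Int) + 1 ∧ ends.getD t 0 ≤ s := by
      intro x hx
      rcases (m2 x).mp hx with h | ⟨p, hp, h1, h2⟩
      · obtain ⟨t, ht, rfl, hle⟩ := inv.free_src x h
        exact ⟨t, ht, rfl, by omega⟩
      · obtain ⟨t, ht, rfl⟩ := inv.busy_src p hp
        exact ⟨t, ht, h2, by simpa using h1⟩
    have hiff : ∀ t : Nat, t < ends.length → (ends.getD t 0 ≤ s ↔ ((t : Int) + 1) ∈ mv.2) := by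
      intro t ht
      constructor
      · intro hle
        rcases inv.part t ht with h | h
        · exact (m2 _).mpr (Or.inr ⟨(ends.getD t 0, (t : Int) + 1), h, hle, rfl⟩)
        · exact (m2 _).mpr (Or.inl h)
      · intro hmem
        obtain ⟨t', ht', heq, hle⟩ := hfree' _ hmem
        have : t' = t := by omega
        subst this; exact hle
    have hbusy' : ∀ p ∈ mv.1, ∃ t : Nat, t < ends.length ∧ p = (ends.getD t 0, (t : Int) + 1)
        ∧ s < ends.getD t 0 := by
      intro p hp
      rw [m1] at hp
      have := List.mem_filter.mp hp
      obtain ⟨t, ht, rfl⟩ := inv.busy_src p this.1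
      exact ⟨t, ht, rfl, by simpa using this.2⟩
    have hb'sorted : mv.1.Pairwise (fun a b => pvGtP b a = false) := by
      rw [m1]; exact inv.busy_sorted.sublist List.filter_sublist
    have hb'nodup : (mv.1.map (·.2)).Nodup := by
      rw [m1]; exact inv.busy_nodup.sublist (List.filter_sublist.map _)
    -- unfold both steps
    have hstepA_def : pvStepA startl endl (assign, ends) i
        = (match pvScanA ends s 0 with
          | some t => (assign.set i ((t : Int) + 1), ends.set t e)
          | none => (assign.set i ((ends.length : Int) + 1), ends ++ [e])) := rfl
    rcases hlast : mv.2.getLast? with _ | c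
    · -- free list empty: new torpedo
      have hnil : mv.2 = [] := List.getLast?_eq_none_iff.mp hlast
      have hscan : pvScanA ends s 0 = none := by
        rcases hsc : pvScanA ends s 0 with _ | t
        · rfl
        · obtain ⟨u, rfl, hu2, hu3, _⟩ := pvScanA_some ends s 0 t hsc
          have := (hiff u hu2).mp hu3
          rw [hnil] at this
          simp at this
      have hstepA : pvStepA startl endl (assign, ends) i
          = (assign.set i ((ends.length : Int) + 1), ends ++ [e]) := by
        rw [hstepA_def, hscan]
      have hstepB : pvStepB startl endl (assign, busy, free, num) i
          = (assign.set i (num + 1), pvInsertDesc pvGtP (0, 0) mv.1 (e, num + 1), mv.2, num + 1) := by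
        simp only [pvStepB, ← hs, ← he, ← hmv, hlast]
      rw [hstepA, hstepB, inv.num_eq]
      have hknotmem : ((ends.length : Int) + 1) ∉ mv.1.map (·.2) := by
        intro hm
        obtain ⟨p, hp, hp2⟩ := List.mem_map.mp hm
        obtain ⟨t, ht, rfl, _⟩ := hbusy' p hp
        simp at hp2
        omega
      apply ih (M := s)
      · refine ⟨by simp, ?_, by rw [hnil]; exact List.Pairwise.nil, by rw [hnil]; exact List.nodup_nil,
          ?_, ?_, ?_, ?_, ?_⟩
        · exact pvInsertDesc_sorted pvGtP (0,0) mv.1 (e, (ends.length : Int) + 1)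
            pvGtP_H1 pvGtP_H2 pvGtP_H3 hb'sorted
        · have hperm := (pvInsertDesc_perm pvGtP (0,0) mv.1 (e, (ends.length : Int) + 1)).map (·.2)
          rw [hperm.nodup_iff]
          simp only [List.map_cons]
          exact List.nodup_cons.mpr ⟨hknotmem, hb'nodup⟩
        · intro p hp
          rw [hnil]
          simp
        · intro p hp
          rcases (pvInsertDesc_mem pvGtP (0,0) mv.1 _ p).mp hp with h | h
          · obtain ⟨t, ht, rfl, _⟩ := hbusy' p h
            refine ⟨t, by simp; omega, ?_⟩
            rw [pvGetD_append_lt ends t e ht]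
          · subst h
            refine ⟨ends.length, by simp, ?_⟩
            rw [pvGetD_append_len ends e]
        · intro x hx
          rw [hnil] at hx
          simp at hx
        · intro t ht
          simp only [List.length_append, List.length_cons, List.length_nil] at ht
          left
          by_cases hcase : t < ends.length
          · rcases inv.part t hcase with h | h
            · have hmem : (ends.getD t 0, (t : Int) + 1) ∈ mv.1 := by
                rw [m1]
                apply List.mem_filter.mpr
                refine ⟨h, ?_⟩
                simp only [decide_eq_true_eq]
                by_contra hle
                have := (hiff t hcase).mp (by omega)
                rw [hnil] at this
                simp at this
              rw [pvGetD_append_lt ends t e hcase]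
              exact (pvInsertDesc_mem pvGtP (0,0) mv.1 _ _).mpr (Or.inl hmem)
            · have := (m2 _).mpr (Or.inl h)
              rw [hnil] at this
              simp at this
          · have : t = ends.length := by omega
            subst this
            rw [pvGetD_append_len ends e]
            exact (pvInsertDesc_mem pvGtP (0,0) mv.1 _ _).mpr (Or.inr (by simp))
      · intro i' hi'
        exact hpw_head i' hi'
      · exact hpw_rest
    · -- reuse: c = min of free list
      have hne : mv.2 ≠ [] := by intro h; rw [h] at hlast; simp at hlast
      have hc : c = mv.2.getLast hne := by
        have h := List.getLast?_eq_getLast_of_ne_nil (l := mv.2) hne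
        rw [h] at hlast
        exact (Option.some.inj hlast).symm
      have hcmem : c ∈ mv.2 := hc ▸ List.getLast_mem hne
      obtain ⟨t0, ht0k, hct0, ht0le⟩ := hfree' c hcmem
      have hmin : ∀ x ∈ mv.2, c ≤ x := by
        intro x hx
        rw [hc]
        exact pvLast_min mv.2 hne m3 x hx
      have hscan : pvScanA ends s 0 = some t0 := by
        rcases hsc : pvScanA ends s 0 with _ | t
        · have := (pvScanA_none ends s 0).mp hsc t0 ht0k
          omega
        · obtain ⟨u, rfl, hu2, hu3, hu4⟩ := pvScanA_some ends s 0 t hsc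
          have h1 : ((u : Int) + 1) ∈ mv.2 := (hiff u hu2).mp hu3
          have h2 : c ≤ (u : Int) + 1 := hmin _ h1
          have h3 : t0 ≤ u := by omega
          have h4 : ¬ (t0 < u) := fun hlt => absurd (hu4 t0 hlt) (by omega)
          have huv : u = t0 := by omega
          simp [huv]
      have hstepA : pvStepA startl endl (assign, ends) i
          = (assign.set i ((t0 : Int) + 1), ends.set t0 e) := by
        rw [hstepA_def, hscan]
      have hstepB : pvStepB startl endl (assign, busy, free, num) i
          = (assign.set i c, pvInsertDesc pvGtP (0, 0) mv.1 (e, c), mv.2.dropLast, num) := by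
        simp only [pvStepB, ← hs, ← he, ← hmv, hlast]
      rw [hstepA, hstepB, ← hct0]
      have hcnot : c ∉ mv.1.map (·.2) := by
        intro hm
        obtain ⟨p, hp, hp2⟩ := List.mem_map.mp hm
        obtain ⟨t, ht, rfl, hgt⟩ := hbusy' p hp
        simp only at hp2
        have : t = t0 := by omega
        subst this
        omega
      apply ih (M := s)
      · refine ⟨by simp [inv.num_eq], ?_, ?_, ?_, ?_, ?_, ?_, ?_, ?_⟩
        · exact pvInsertDesc_sorted pvGtP (0,0) mv.1 (e, c) pvGtP_H1 pvGtP_H2 pvGtP_H3 hb'sorted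
        · exact m3.sublist (List.dropLast_sublist _)
        · exact m4.sublist (List.dropLast_sublist _)
        · have hperm := (pvInsertDesc_perm pvGtP (0,0) mv.1 (e, c)).map (·.2)
          rw [hperm.nodup_iff]
          simp only [List.map_cons]
          exact List.nodup_cons.mpr ⟨hcnot, hb'nodup⟩
        · intro p hp hmem
          obtain ⟨pm, pne⟩ := (pvMem_dropLast mv.2 hne m4 p.2).mp hmem
          rcases (pvInsertDesc_mem pvGtP (0,0) mv.1 _ p).mp hp with h | h
          · obtain ⟨t, ht, rfl, hgt⟩ := hbusy' p h
            have := (hiff t ht).mpr pm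
            omega
          · subst h
            exact pne hc
        · intro p hp
          rcases (pvInsertDesc_mem pvGtP (0,0) mv.1 _ p).mp hp with h | h
          · obtain ⟨t, ht, rfl, hgt⟩ := hbusy' p h
            have htne : t ≠ t0 := by intro hh; subst hh; omega
            refine ⟨t, by simpa using ht, ?_⟩
            rw [pvGetD_set ends t0 t e, if_neg (by tauto)]
          · subst h
            refine ⟨t0, by simpa using ht0k, ?_⟩
            rw [pvGetD_set ends t0 t0 e, if_pos ⟨rfl, ht0k⟩, hct0]
        · intro x hx
          obtain ⟨xm, xne⟩ := (pvMem_dropLast mv.2 hne m4 x).mp hx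
          obtain ⟨t, ht, rfl, hle⟩ := hfree' x xm
          have htne : t ≠ t0 := by
            intro hh; subst hh
            exact xne (by rw [← hc, hct0])
          refine ⟨t, by simpa using ht, rfl, ?_⟩
          rw [pvGetD_set ends t0 t e, if_neg (by tauto)]
          exact hle
        · intro t ht
          simp only [List.length_set] at ht
          by_cases hteq : t = t0
          · subst hteq
            left
            rw [pvGetD_set ends t t e, if_pos ⟨rfl, ht⟩]
            exact (pvInsertDesc_mem pvGtP (0,0) mv.1 _ _).mpr (Or.inr (by rw [hct0]))
          · have hmemdrop : ((t : Int) + 1) ∈ mv.2 → ((t : Int) + 1) ∈ mv.2.dropLast := by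
              intro hmem
              apply (pvMem_dropLast mv.2 hne m4 _).mpr
              refine ⟨hmem, ?_⟩
              rw [← hc]
              intro hh
              rw [hct0] at hh
              have : t = t0 := by omega
              exact hteq this
            rcases inv.part t ht with h | h
            · by_cases hcase : s < ends.getD t 0
              · left
                rw [pvGetD_set ends t0 t e, if_neg (by tauto)]
                apply (pvInsertDesc_mem pvGtP (0,0) mv.1 _ _).mpr
                left
                rw [m1]
                exact List.mem_filter.mpr ⟨h, by simpa using hcase⟩
              · right
                exact hmemdrop ((hiff t ht).mp (by omega))
            · right
              exact hmemdrop ((m2 _).mpr (Or.inl h))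
      · intro i' hi'
        exact hpw_head i' hi'
      · exact hpw_rest


-- ===== VERDICT (by name: the statement is the Claim_ definition above) =====
theorem optimize_torpedo_assignment_spec : Claim_equal_optimize_torpedo_assignment := by
  intro st et _ _
  unfold Spec_optimize_torpedo_assignment optimize_torpedo_assignment optimize_torpedo_assignment_alt
  dsimp only
  have hpw := PySem.List.sorted_pairwise (List.range st.length) (fun k => st.getD k 0)
  obtain ⟨ord, hord⟩ : ∃ o, o = PySem.List.sorted (List.range st.length) (fun k => st.getD k 0) false :=
    ⟨_, rfl⟩
  rw [← hord] at hpw ⊢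
  cases ord with
  | nil => simp
  | cons i rest =>
    obtain ⟨hhead, hrest⟩ := List.pairwise_cons.mp hpw
    have h := pvMainB st et (i :: rest) (st.getD i 0) (List.replicate st.length 0) [] [] [] 0
      ⟨rfl, List.Pairwise.nil, List.Pairwise.nil, List.nodup_nil, List.nodup_nil,
        by simp, by simp, by simp, by simp⟩
      (by
        intro i' hi'
        rcases List.mem_cons.mp hi' with rfl | hm
        · exact le_refl _
        · exact hhead i' hm)
      hpw
    exact Prod.ext h.1 h.2
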